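-- pv_equiv track=rewrite | github.com/dong-y21/metro-scheduling | 3l2d/Parameters.py | calculate_boundary_pos
-- ===== SOURCE A (Python) =====
-- def calculate_boundary_pos(num_services):
--     num_lines = len(num_services)
--     start_pos = [0]
--     end_pos = []
--     end = 0
--     for l in range(num_lines):
--         end += num_services[l]
--         end_pos.append(end)
--     for l in range(num_lines):
--         end += num_services[l]
--         end_pos.append(end)
--     start_pos = start_pos + end_pos[:-1]
--     return start_pos, end_pos
-- ===== SOURCE B (Python) =====
-- def calculate_boundary_pos(num_services):
--     # Backward derivation: compute the grand total of the doubled schedule first,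
--     # then walk the doubled list right-to-left, emitting the running remainder as
--     # each end position and subtracting the segment's count to step left.
--     doubled = num_services + num_services
--     run = sum(doubled)
--     end_pos = []
--     for x in reversed(doubled):
--         end_pos.append(run)
--         run -= x
--     end_pos.reverse()
--     return [0] + end_pos[:-1], end_pos
-- ===== Notes on version B (the rewrite author's own statement) =====
-- stated objective: alternative
-- what changed: B computes the grand total of the doubled service list first and then derives every end position right-to-left by subtracting counts from the running remainder, instead of A's two forward loops accumulating a carried sum.
import Mathlib
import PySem

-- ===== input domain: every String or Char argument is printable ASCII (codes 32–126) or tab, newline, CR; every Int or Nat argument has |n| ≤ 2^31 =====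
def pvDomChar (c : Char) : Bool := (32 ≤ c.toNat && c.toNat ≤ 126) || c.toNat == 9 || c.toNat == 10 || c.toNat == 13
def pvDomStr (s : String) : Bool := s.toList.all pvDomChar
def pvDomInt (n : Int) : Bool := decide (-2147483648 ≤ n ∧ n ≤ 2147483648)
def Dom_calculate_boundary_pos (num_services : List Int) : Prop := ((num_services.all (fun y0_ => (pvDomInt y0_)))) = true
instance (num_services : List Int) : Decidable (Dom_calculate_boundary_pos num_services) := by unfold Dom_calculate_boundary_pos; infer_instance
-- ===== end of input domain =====

-- B computes the grand total of the doubled list first and derives every end position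
-- right-to-left by subtracting counts from the running remainder, instead of A's two
-- forward accumulator loops (alternative decomposition, same cost).

-- ===== PORT A =====
def calculate_boundary_pos (num_services : List Int) : List Int × List Int :=
  let num_lines : Int := num_services.length
  let start_pos : List Int := [0]
  -- state = (end, end_pos); first loop over range(num_lines)
  let s1 := (PySem.List.pyRange 0 num_lines 1).foldl
      (fun (s : Int × List Int) l => (s.1 + PySem.List.pyGetD num_services l 0,
                                      s.2 ++ [s.1 + PySem.List.pyGetD num_services l 0]))
      ((0 : Int), ([] : List Int))
  -- second loop, continuing the same accumulator
  let s2 := (PySem.List.pyRange 0 num_lines 1).foldl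
      (fun (s : Int × List Int) l => (s.1 + PySem.List.pyGetD num_services l 0,
                                      s.2 ++ [s.1 + PySem.List.pyGetD num_services l 0]))
      s1
  let end_pos := s2.2
  (start_pos ++ PySem.List.slice end_pos none (some (-1)), end_pos)

-- ===== PORT B =====
def calculate_boundary_pos_alt (num_services : List Int) : List Int × List Int :=
  let doubled := num_services ++ num_services
  let run : Int := doubled.sum
  -- for x in reversed(doubled): end_pos.append(run); run -= x
  let p := doubled.reverse.foldl
      (fun (s : Int × List Int) x => (s.1 - x, s.2 ++ [s.1])) (run, ([] : List Int))
  let end_pos := p.2.reverse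
  ([(0 : Int)] ++ PySem.List.slice end_pos none (some (-1)), end_pos)

-- ===== PRECONDITION & SPEC =====
def Spec_calculate_boundary_pos (num_services : List Int) (out : List Int × List Int) : Prop := out = calculate_boundary_pos_alt num_services
instance (num_services : List Int) (out : List Int × List Int) : Decidable (Spec_calculate_boundary_pos num_services out) := by unfold Spec_calculate_boundary_pos; infer_instance

-- ===== CLAIM (what is proved, stated in full; the proofs are below) =====
def Claim_equal_calculate_boundary_pos : Prop := ∀ (num_services : List Int), Dom_calculate_boundary_pos num_services → Spec_calculate_boundary_pos num_services (calculate_boundary_pos num_services)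

-- ===== LEMMAS AND PROOFS =====

-- the forward prefix-sum list of xs, as A's loops produce it from the zero state
def pvPfx (xs : List Int) : List Int :=
  (xs.foldl (fun (s : Int × List Int) x => (s.1 + x, s.2 ++ [s.1 + x])) ((0 : Int), ([] : List Int))).2

-- A's forward scan, started at (e, acc), is acc ++ (shift of the scan started at (0, [])).
theorem pv_scan_shift (xs : List Int) (e : Int) (acc : List Int) :
    xs.foldl (fun (s : Int × List Int) x => (s.1 + x, s.2 ++ [s.1 + x])) (e, acc)
    = (e + xs.sum, acc ++ (pvPfx xs).map (fun p => e + p)) := by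
  induction xs generalizing e acc with
  | nil => simp [pvPfx]
  | cons x t ih =>
    simp only [pvPfx, List.foldl_cons]
    rw [ih (e + x) (acc ++ [e + x]), ih (0 + x) ([] ++ [0 + x])]
    simp [pvPfx, List.map_map, add_assoc]

-- B's backward walk over xs.reverse, started at (e + xs.sum, acc), emits the shifted
-- forward prefix sums in reverse and ends with remainder e.
theorem pv_back_scan (xs : List Int) (e : Int) (acc : List Int) :
    xs.reverse.foldl (fun (s : Int × List Int) x => (s.1 - x, s.2 ++ [s.1])) (e + xs.sum, acc)
    = (e, acc ++ ((pvPfx xs).map (fun p => e + p)).reverse) := by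
  induction xs generalizing e acc with
  | nil => simp [pvPfx]
  | cons x t ih =>
    have hpfx : pvPfx (x :: t) = [x] ++ (pvPfx t).map (fun p => x + p) := by
      simp only [pvPfx, List.foldl_cons]
      rw [pv_scan_shift t (0 + x) ([] ++ [0 + x])]
      simp [pvPfx]
    simp only [List.reverse_cons, List.foldl_append, List.foldl_cons, List.foldl_nil,
               List.sum_cons]
    have : e + (x + t.sum) = (e + x) + t.sum := by ring
    rw [this, ih (e + x) acc]
    simp [hpfx, List.map_map, add_assoc]

-- ===== VERDICT (by name: the statement is the Claim_ definition above) =====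
theorem calculate_boundary_pos_spec : Claim_equal_calculate_boundary_pos := by
  intro xs _
  show _ = _
  simp only [calculate_boundary_pos, calculate_boundary_pos_alt]
  rw [PySem.List.foldl_pyRange_zero_pyGetD' xs 0
        (fun (s : Int × List Int) v => (s.1 + v, s.2 ++ [s.1 + v])),
      PySem.List.foldl_pyRange_zero_pyGetD' xs 0
        (fun (s : Int × List Int) v => (s.1 + v, s.2 ++ [s.1 + v]))]
  rw [(List.foldl_append (l := xs) (l' := xs)).symm, pv_scan_shift (xs ++ xs) 0 []]
  have hsum : (xs ++ xs).sum = 0 + (xs ++ xs).sum := by ring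
  rw [hsum, pv_back_scan (xs ++ xs) 0 []]
  simp
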